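-- pv_equiv track=rewrite | github.com/subhojit1016/MDSCode | Local_search done.py | maximum_degree_later
-- ===== SOURCE A (Python) =====
-- def maximum_degree_later(array1, d, vertex, y):
--     degree_1 = []
--     temp_array = []
--     for i in range(len(array1)):
--         if (array1[i] == 0):
--             degree_1.append(d[i])
--             temp_array.append(vertex[i])
--
--     val = max(degree_1)
--     index = degree_1.index(val)
--     index_element = temp_array[index]
--     return index_element
-- ===== SOURCE B (Python) =====
-- def maximum_degree_later(array1, d, vertex, y):
--     # Single pass: running first-maximum argmax over the zero-marked candidates.
--     best = None  # (degree, vertex) of the best candidate seen so far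
--     for i, a in enumerate(array1):
--         if a == 0:
--             cand = (d[i], vertex[i])
--             if best is None or best[0] < cand[0]:
--                 best = cand
--     if best is None:
--         raise ValueError("no zero-marked vertex")
--     return best[1]
-- ===== Notes on version B (the rewrite author's own statement) =====
-- stated objective: simpler
-- what changed: Replaces A's three passes (build two parallel candidate lists, then max(), then .index(), then index back into the second list) by one running-argmax loop that keeps only the best (degree, vertex) pair, updating on strict improvement so the first maximum wins exactly as .index does.
import Mathlib
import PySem

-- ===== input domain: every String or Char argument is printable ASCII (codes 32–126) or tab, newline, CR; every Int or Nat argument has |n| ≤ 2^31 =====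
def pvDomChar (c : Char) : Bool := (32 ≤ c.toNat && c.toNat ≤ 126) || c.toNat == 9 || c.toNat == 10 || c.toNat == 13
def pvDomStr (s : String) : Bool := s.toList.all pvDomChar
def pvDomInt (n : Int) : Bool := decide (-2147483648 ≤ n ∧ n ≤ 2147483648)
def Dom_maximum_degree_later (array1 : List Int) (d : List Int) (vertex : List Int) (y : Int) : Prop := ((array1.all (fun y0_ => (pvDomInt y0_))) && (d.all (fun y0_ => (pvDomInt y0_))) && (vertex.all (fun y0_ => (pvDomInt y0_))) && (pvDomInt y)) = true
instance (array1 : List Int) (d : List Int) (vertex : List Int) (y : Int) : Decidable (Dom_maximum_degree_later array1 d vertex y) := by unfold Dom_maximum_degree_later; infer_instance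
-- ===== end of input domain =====

-- B replaces A's collect-two-lists / max / index passes by one running first-maximum argmax loop; same values, simpler.


-- ===== PORT A =====
def maximum_degree_later (array1 : List Int) (d : List Int) (vertex : List Int) (y : Int) : Int :=
  let p := (PySem.List.pyRange 0 (PySem.List.len array1) 1).foldl
    (fun (st : List Int × List Int) i =>
      if PySem.List.pyGetD array1 i 0 = 0 then
        (st.1 ++ [PySem.List.pyGetD d i 0], st.2 ++ [PySem.List.pyGetD vertex i 0])
      else st) ([], [])
  let val : Int := (PySem.List.max? p.1 (fun x => x)).getD 0
  let index : Nat := (PySem.List.index? p.1 val).getD 0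
  PySem.List.pyGetD p.2 (index : Int) 0

-- ===== PORT B =====
def maximum_degree_later_alt (array1 : List Int) (d : List Int) (vertex : List Int) (y : Int) : Int :=
  let best := (PySem.List.enumerate array1 0).foldl
    (fun (best : Option (Int × Int)) (ia : Int × Int) =>
      if ia.2 = 0 then
        let cand := (PySem.List.pyGetD d ia.1 0, PySem.List.pyGetD vertex ia.1 0)
        match best with
        | none => some cand
        | some b => if b.1 < cand.1 then some cand else some b
      else best) none
  match best with
  | some b => b.2
  | none => 0   -- unreachable under Pre_ (the Python raises ValueError there)

-- ===== PRECONDITION & SPEC =====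
-- Pre_ excludes exactly the inputs where the Python raises: no zero-marked index at all
-- (max([]) is ValueError), or some zero-marked index out of range of d or vertex (IndexError).
def Pre_maximum_degree_later (array1 : List Int) (d : List Int) (vertex : List Int) (y : Int) : Prop :=
  (0 : Int) ∈ array1 ∧
  ∀ i : Nat, i < array1.length → array1.getD i 1 = 0 → i < d.length ∧ i < vertex.length
instance (array1 : List Int) (d : List Int) (vertex : List Int) (y : Int) : Decidable (Pre_maximum_degree_later array1 d vertex y) := by unfold Pre_maximum_degree_later; infer_instance
def pvWitness_maximum_degree_later : List Int × List Int × List Int × Int := ([1, 0, 0], [7, 3, 5], [10, 20, 30], 0)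

def Spec_maximum_degree_later (array1 : List Int) (d : List Int) (vertex : List Int) (y : Int) (out : Int) : Prop := out = maximum_degree_later_alt array1 d vertex y
instance (array1 : List Int) (d : List Int) (vertex : List Int) (y : Int) (out : Int) : Decidable (Spec_maximum_degree_later array1 d vertex y out) := by unfold Spec_maximum_degree_later; infer_instance

-- ===== CLAIM (what is proved, stated in full; the proofs are below) =====
def Claim_equal_maximum_degree_later : Prop := ∀ (array1 : List Int) (d : List Int) (vertex : List Int) (y : Int), Dom_maximum_degree_later array1 d vertex y → Pre_maximum_degree_later array1 d vertex y → Spec_maximum_degree_later array1 d vertex y (maximum_degree_later array1 d vertex y)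

-- ===== LEMMAS AND PROOFS =====

-- the running-best combine of B's loop (once the first candidate is in)
def pvComb (p q : Int × Int) : Int × Int := if p.1 < q.1 then q else p

-- A's loop over any index list collects exactly the filtered-mapped candidate list, split into components
theorem pvFoldA_eq (pred : Int → Prop) [DecidablePred pred] (g : Int → Int × Int) :
    ∀ (L : List Int) (a1 a2 : List Int),
      L.foldl (fun (st : List Int × List Int) i =>
          if pred i then (st.1 ++ [(g i).1], st.2 ++ [(g i).2]) else st) (a1, a2)
        = (a1 ++ ((L.filter (fun i => decide (pred i))).map g).map Prod.fst,
           a2 ++ ((L.filter (fun i => decide (pred i))).map g).map Prod.snd) := by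
  intro L
  induction L with
  | nil => intro a1 a2; simp
  | cons x t ih =>
    intro a1 a2
    by_cases hx : pred x <;> simp [List.foldl_cons, hx, ih, List.append_assoc]

-- B's loop over any index list is the fold of its step over the same candidate list
theorem pvFoldB_eq (pred : Int → Prop) [DecidablePred pred] (g : Int → Int × Int)
    (bstep : Option (Int × Int) → (Int × Int) → Option (Int × Int)) :
    ∀ (L : List Int) (b : Option (Int × Int)),
      L.foldl (fun b i => if pred i then bstep b (g i) else b) b
        = ((L.filter (fun i => decide (pred i))).map g).foldl bstep b := by
  intro L
  induction L with
  | nil => intro b; simp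
  | cons x t ih =>
    intro b
    by_cases hx : pred x <;> simp [List.foldl_cons, hx, ih]

theorem pvFoldB_some (cs : List (Int × Int)) : ∀ (p : Int × Int),
    cs.foldl (fun b q => match b with
        | none => some q
        | some b' => if b'.1 < q.1 then some q else some b') (some p)
      = some (cs.foldl pvComb p) := by
  induction cs with
  | nil => intro p; simp
  | cons q t ih =>
    intro p
    simp only [List.foldl_cons]
    by_cases h : p.1 < q.1 <;> simp [pvComb, h, ih]

theorem pvComb_fst (cs : List (Int × Int)) : ∀ (c : Int × Int),
    (cs.foldl pvComb c).1 = (cs.map Prod.fst).foldl max c.1 := by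
  induction cs with
  | nil => intro c; simp
  | cons q t ih =>
    intro c
    simp only [List.foldl_cons, List.map_cons]
    by_cases h : c.1 < q.1
    · rw [show pvComb c q = q by simp [pvComb, h], ih, max_eq_right (le_of_lt h)]
    · rw [show pvComb c q = c by simp [pvComb, h], ih, max_eq_left (not_lt.mp h)]

theorem pvInit_le_foldl_max (l : List Int) : ∀ (x : Int), x ≤ l.foldl max x := by
  induction l with
  | nil => intro x; simp
  | cons a t ih =>
    intro x
    exact le_trans (le_max_left x a) (ih (max x a))

-- first-maximum decomposition: B's running best sits in the candidate list after a prefix of strictly smaller degrees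
theorem pvComb_decomp (cs : List (Int × Int)) : ∀ (c : Int × Int),
    ∃ pre suf, c :: cs = pre ++ (cs.foldl pvComb c) :: suf ∧
      ∀ p ∈ pre, p.1 < (cs.foldl pvComb c).1 := by
  induction cs with
  | nil => intro c; exact ⟨[], [], by simp, by simp⟩
  | cons q t ih =>
    intro c
    simp only [List.foldl_cons]
    by_cases h : c.1 < q.1
    · obtain ⟨pre, suf, h1, h2⟩ := ih (pvComb c q)
      refine ⟨c :: pre, suf, ?_, ?_⟩
      · simp only [pvComb, if_pos h] at h1 ⊢
        rw [List.cons_append, ← h1]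
      · intro p hp
        have hq : q.1 ≤ (t.foldl pvComb (pvComb c q)).1 := by
          rw [pvComb_fst]
          simpa [pvComb, if_pos h] using pvInit_le_foldl_max (t.map Prod.fst) (pvComb c q).1
        rcases List.mem_cons.mp hp with rfl | hp
        · omega
        · exact h2 p hp
    · obtain ⟨pre, suf, h1, h2⟩ := ih (pvComb c q)
      simp only [pvComb, if_neg h] at h1 h2 ⊢
      cases pre with
      | nil =>
        rw [List.nil_append] at h1
        obtain ⟨hc, -⟩ := List.cons.inj h1
        exact ⟨[], q :: t, by rw [List.nil_append, ← hc], by simp⟩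
      | cons c' pre' =>
        rw [List.cons_append] at h1
        obtain ⟨hc, ht⟩ := List.cons.inj h1
        have hlt : c'.1 < (t.foldl pvComb c).1 := h2 c' (by simp)
        refine ⟨c :: q :: pre', suf, ?_, ?_⟩
        · simp only [List.cons_append]
          rw [← ht]
        · intro p hp
          have hclt : c.1 < (t.foldl pvComb c).1 := by rw [congrArg Prod.fst hc]; exact hlt
          rcases List.mem_cons.mp hp with rfl | hp
          · exact hclt
          rcases List.mem_cons.mp hp with rfl | hp
          · omega
          · exact h2 p (by simp [hp])

-- A's max-then-index-then-lookup on the two component lists returns exactly B's running best's vertex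
theorem pvCore (c : Int × Int) (cs : List (Int × Int)) :
    PySem.List.pyGetD ((c :: cs).map Prod.snd)
      ((((PySem.List.index? ((c :: cs).map Prod.fst)
          ((PySem.List.max? ((c :: cs).map Prod.fst) (fun x => x)).getD 0)).getD 0 : Nat) : Int)) 0
      = (cs.foldl pvComb c).2 := by
  obtain ⟨pre, suf, hsplit, hlt⟩ := pvComb_decomp cs c
  have hM : (PySem.List.max? ((c :: cs).map Prod.fst) (fun x => x)).getD 0
      = (cs.foldl pvComb c).1 := by
    rw [List.map_cons, PySem.List.max?_id_cons, Option.getD_some, ← pvComb_fst]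
  have hfst : (c :: cs).map Prod.fst
      = pre.map Prod.fst ++ (cs.foldl pvComb c).1 :: suf.map Prod.fst := by
    rw [hsplit]; simp
  have hidx : PySem.List.index? ((c :: cs).map Prod.fst) ((cs.foldl pvComb c).1)
      = some pre.length := by
    rw [(PySem.List.index?_eq_some_iff _ _ _)]
    refine ⟨pre.map Prod.fst, suf.map Prod.fst, hfst, by simp, ?_⟩
    intro hmem
    obtain ⟨p, hp, hpeq⟩ := List.mem_map.mp hmem
    exact absurd hpeq (ne_of_lt (hlt p hp))
  rw [hM, hidx, Option.getD_some, PySem.List.pyGetD_natCast]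
  have hsnd : (c :: cs).map Prod.snd
      = pre.map Prod.snd ++ (cs.foldl pvComb c).2 :: suf.map Prod.snd := by
    rw [hsplit]; simp
  rw [hsnd, List.getD, List.getElem?_append_right (by simp)]
  simp

-- ===== VERDICT (by name: the statement is the Claim_ definition above) =====
theorem maximum_degree_later_spec : Claim_equal_maximum_degree_later := by
  intro array1 d vertex y _ hpre
  unfold Spec_maximum_degree_later maximum_degree_later maximum_degree_later_alt
  have hA := pvFoldA_eq (fun i => PySem.List.pyGetD array1 i 0 = 0)
    (fun i => (PySem.List.pyGetD d i 0, PySem.List.pyGetD vertex i 0))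
    (PySem.List.pyRange 0 (PySem.List.len array1) 1) [] []
  have hB := pvFoldB_eq (fun i => PySem.List.pyGetD array1 i 0 = 0)
    (fun i => (PySem.List.pyGetD d i 0, PySem.List.pyGetD vertex i 0))
    (fun b q => match b with
      | none => some q
      | some b' => if b'.1 < q.1 then some q else some b')
    (PySem.List.pyRange 0 (PySem.List.len array1) 1) none
  set cs := (((PySem.List.pyRange 0 (PySem.List.len array1) 1).filter
      (fun i => decide (PySem.List.pyGetD array1 i 0 = 0))).map
      (fun i => (PySem.List.pyGetD d i 0, PySem.List.pyGetD vertex i 0))) with hcs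
  -- the candidate list is nonempty: array1 contains a zero
  have hne : cs ≠ [] := by
    obtain ⟨i, hi, hzero⟩ := List.getElem_of_mem hpre.1
    have hmem : (i : Int) ∈ (PySem.List.pyRange 0 (PySem.List.len array1) 1).filter
        (fun i => decide (PySem.List.pyGetD array1 i 0 = 0)) := by
      rw [List.mem_filter]
      refine ⟨PySem.List.mem_pyRange_one.mpr ⟨Int.natCast_nonneg i, ?_⟩, ?_⟩
      · simp only [PySem.List.len_eq]
        exact_mod_cast hi
      · simp [PySem.List.pyGetD_natCast, List.getD_eq_getElem?_getD,
          List.getElem?_eq_getElem hi, hzero]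
    exact List.ne_nil_of_mem (by rw [hcs]; exact List.mem_map_of_mem hmem)
  obtain ⟨c, cs', hcons⟩ := List.exists_cons_of_ne_nil hne
  simp only at hA hB
  rw [PySem.List.enumerate_eq_map_pyRange array1 0, List.foldl_map]
  simp only [hA, hB, hcons, List.nil_append]
  rw [show (c :: cs').foldl (fun b q => match b with
      | none => some q
      | some b' => if b'.1 < q.1 then some q else some b') none
    = some (cs'.foldl pvComb c) by rw [List.foldl_cons]; exact pvFoldB_some cs' c]
  exact pvCore c cs'
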